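-- pv_equiv track=rewrite | github.com/demoshane/secondbrain | engine/passes/__init__.py | _extract_original_parts
-- ===== SOURCE A (Python) =====
-- def _extract_original_parts(original: str, masked: str, masked_parts: list[str]) -> list[str]:
--     """Given parts of the masked string, recover the corresponding original text slices."""
--     if len(masked_parts) == 1:
--         return [original]
--
--     # Reconstruct by character position tracking
--     result = []
--     pos = 0
--     for part in masked_parts:
--         end = pos + len(part)
--         result.append(original[pos:end])
--         pos = end
--
--     return result
-- ===== SOURCE B (Python) =====
-- def _extract_original_parts(original: str, masked: str, masked_parts: list[str]) -> list[str]: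
--     """Recover original text slices by streaming characters off a shared iterator."""
--     if len(masked_parts) == 1:
--         return [original]
--
--     chars = iter(original)
--     return [''.join(next(chars, '') for _ in range(len(p))) for p in masked_parts]
-- ===== Notes on version B (the rewrite author's own statement) =====
-- stated objective: alternative
-- what changed: Replaces the position-tracking slicing loop (running offset, original[pos:end]) with a shared character iterator over original from which each part consumes len(part) characters via next(), joining them into the output; no indices or slices at all.
import Mathlib
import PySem

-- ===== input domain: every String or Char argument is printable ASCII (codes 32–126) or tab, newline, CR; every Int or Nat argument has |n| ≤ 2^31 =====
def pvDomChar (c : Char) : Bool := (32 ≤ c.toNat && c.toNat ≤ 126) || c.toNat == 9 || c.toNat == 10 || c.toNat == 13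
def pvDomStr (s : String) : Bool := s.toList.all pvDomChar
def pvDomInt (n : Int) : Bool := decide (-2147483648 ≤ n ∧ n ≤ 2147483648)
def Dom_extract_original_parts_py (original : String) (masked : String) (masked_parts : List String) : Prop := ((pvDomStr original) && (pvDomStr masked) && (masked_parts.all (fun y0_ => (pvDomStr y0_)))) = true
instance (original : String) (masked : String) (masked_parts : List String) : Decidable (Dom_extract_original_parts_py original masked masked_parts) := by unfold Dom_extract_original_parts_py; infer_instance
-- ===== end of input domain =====

-- B replaces A's position-tracking slicing loop with a shared character iterator: each part consumes len(part) chars via next() (objective: alternative).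

-- ===== PORT A =====
-- literal transliteration of A: result list + running position, one slice original[pos:end] per part
def extract_original_parts_py (original : String) (masked : String) (masked_parts : List String) : List String :=
  if masked_parts.length == 1 then [original]
  else
    (masked_parts.foldl
      (fun (acc : List String × Int) part =>
        let e := acc.2 + PySem.Str.len part
        (acc.1 ++ [PySem.Str.slice original (some acc.2) (some e)], e))
      ([], 0)).1

-- ===== PORT B =====
-- the iterator state is the list of characters not yet consumed; one next(chars, '') call per
-- range step: returns the head character (or nothing when exhausted) and the advanced iterator.
-- pvNextN chars n = the characters yielded by n next() calls, and the iterator afterwards.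
def pvNextN : List Char → Nat → (List Char × List Char)
  | rest, 0 => ([], rest)
  | [], _ + 1 => ([], [])
  | c :: rest, n + 1 =>
      let t := pvNextN rest n
      (c :: t.1, t.2)

-- the comprehension: for each part, ''.join of len(part) next() calls (String.ofList is exact for
-- ''.join over single characters), threading the iterator state
def pvStream : List Char → List String → List String
  | _, [] => []
  | chars, p :: ps =>
      let t := pvNextN chars (PySem.Str.len p).toNat
      String.ofList t.1 :: pvStream t.2 ps

def extract_original_parts_py_alt (original : String) (masked : String) (masked_parts : List String) : List String :=
  if masked_parts.length == 1 then [original]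
  else pvStream original.toList masked_parts

-- ===== PRECONDITION & SPEC =====
def Spec_extract_original_parts_py (original : String) (masked : String) (masked_parts : List String) (out : List String) : Prop := out = extract_original_parts_py_alt original masked masked_parts
instance (original : String) (masked : String) (masked_parts : List String) (out : List String) : Decidable (Spec_extract_original_parts_py original masked masked_parts out) := by unfold Spec_extract_original_parts_py; infer_instance

-- ===== CLAIM (what is proved, stated in full; the proofs are below) =====
def Claim_equal_extract_original_parts_py : Prop := ∀ (original : String) (masked : String) (masked_parts : List String), Dom_extract_original_parts_py original masked masked_parts → Spec_extract_original_parts_py original masked masked_parts (extract_original_parts_py original masked masked_parts)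

-- ===== LEMMAS AND PROOFS =====
-- n next() calls yield exactly take n, leaving drop n
lemma pvNextN_eq (l : List Char) (n : Nat) : pvNextN l n = (l.take n, l.drop n) := by
  induction l generalizing n with
  | nil => cases n <;> simp [pvNextN]
  | cons c rest ih => cases n <;> simp [pvNextN, ih]

lemma pvFold_eq_stream (orig : String) :
    ∀ (parts : List String) (acc : List String) (j : ℕ),
      (parts.foldl
        (fun (st : List String × Int) part =>
          let e := st.2 + PySem.Str.len part
          (st.1 ++ [PySem.Str.slice orig (some st.2) (some e)], e))
        (acc, (j : Int))).1
      = acc ++ pvStream (orig.toList.drop j) parts := by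
  intro parts
  induction parts with
  | nil => intro acc j; simp [pvStream]
  | cons p ps ih =>
      intro acc j
      have hlen : PySem.Str.len p = ((p.toList.length : ℕ) : Int) := by
        simp [PySem.Str.len_eq]
      simp only [List.foldl_cons, pvStream, hlen, pvNextN_eq]
      have hcast : (j : Int) + ((p.toList.length : ℕ) : Int)
          = ((j + p.toList.length : ℕ) : Int) := by push_cast; ring
      rw [hcast, ih]
      have hs : PySem.Str.slice orig (some (j : Int))
            (some (((j + p.toList.length : ℕ) : Int)))
          = String.ofList ((orig.toList.drop j).take p.toList.length) := by
        apply String.toList_inj.mp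
        rw [← hcast]
        simp [PySem.List.slice_natCast_add]
      rw [hs]
      simp [List.drop_drop]

-- ===== VERDICT (by name: the statement is the Claim_ definition above) =====
theorem extract_original_parts_py_spec : Claim_equal_extract_original_parts_py := by
  intro original masked masked_parts _
  unfold Spec_extract_original_parts_py extract_original_parts_py extract_original_parts_py_alt
  by_cases h : masked_parts.length == 1
  · simp [h]
  · simp only [h, Bool.false_eq_true, if_false]
    have := pvFold_eq_stream original masked_parts [] 0
    simpa using this
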